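-- pv_equiv track=rewrite | github.com/Aiu26/pdfoperations | test.py | solution
-- ===== SOURCE A (Python) =====
-- def solution(N, A, B):
--     # Create a dictionary to represent the graph
--     graph = {}
--
--     # Populate the graph with edges
--     for i in range(len(A)):
--         if A[i] not in graph:
--             graph[A[i]] = []
--         if B[i] not in graph:
--             graph[B[i]] = []
--         graph[A[i]].append(B[i])
--         graph[B[i]].append(A[i])
--
--     seconds = 0
--
--     while True:
--         # Find vertices with at most one edge and mark them for removal
--         to_remove = []
--         for vertex in graph:
--             if len(graph[vertex]) <= 1:
--                 to_remove.append(vertex)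
--
--         # If no vertices to remove, break the loop
--         if not to_remove:
--             break
--
--         # Remove marked vertices and update their neighbors
--         for vertex in to_remove:
--             for neighbor in graph[vertex]:
--                 graph[neighbor].remove(vertex)
--             del graph[vertex]
--
--         seconds += 1
--
--     # If there are remaining vertices, return the number of seconds
--     if graph:
--         return seconds
--     else:
--         return 0
-- ===== SOURCE B (Python) =====
-- def solution(N, A, B):
--     # Round-based leaf peeling over an immutable edge list: each round recomputes
--     # degrees from the surviving edges and drops every vertex of degree <= 1.
--     edges = list(zip(A, B))
--     alive = []
--     seen = set()
--     for a, b in edges: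
--         if a not in seen:
--             seen.add(a)
--             alive.append(a)
--         if b not in seen:
--             seen.add(b)
--             alive.append(b)
--     seconds = 0
--     while True:
--         deg = {}
--         for a, b in edges:
--             deg[a] = deg.get(a, 0) + 1
--             deg[b] = deg.get(b, 0) + 1
--         leaves = [v for v in alive if deg.get(v, 0) <= 1]
--         if not leaves:
--             return seconds if alive else 0
--         leafset = set(leaves)
--         alive = [v for v in alive if v not in leafset]
--         edges = [(a, b) for (a, b) in edges if a not in leafset and b not in leafset]
--         seconds += 1
-- ===== Notes on version B (the rewrite author's own statement) =====
-- stated objective: alternative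
-- what changed: A mutates an adjacency dict (list.remove per edge, del per vertex) while scanning all dict keys each round; B keeps an immutable edge list plus a list of live vertices, recomputes a degree counter from the surviving edges each round and filters both lists, with no adjacency structure or in-place mutation at all.
import Mathlib
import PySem

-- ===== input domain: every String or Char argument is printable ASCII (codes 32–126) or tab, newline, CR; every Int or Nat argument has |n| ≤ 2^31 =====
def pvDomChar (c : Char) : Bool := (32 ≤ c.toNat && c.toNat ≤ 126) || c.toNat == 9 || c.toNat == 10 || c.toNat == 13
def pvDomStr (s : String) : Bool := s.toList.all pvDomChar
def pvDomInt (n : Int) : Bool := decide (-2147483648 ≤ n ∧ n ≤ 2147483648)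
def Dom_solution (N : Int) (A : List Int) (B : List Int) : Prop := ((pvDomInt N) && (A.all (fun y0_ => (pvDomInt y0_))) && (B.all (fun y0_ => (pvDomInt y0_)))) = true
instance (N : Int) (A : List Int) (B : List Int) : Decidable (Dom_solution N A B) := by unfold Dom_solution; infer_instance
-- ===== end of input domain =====

set_option maxRecDepth 4096

-- B replaces A's mutable adjacency-dict peeling by round-based peeling over an immutable
-- edge list (degrees recomputed per round); objective: alternative structure, same result.


-- ===== PORT A =====
-- graph[neighbor].remove(vertex): Python raises KeyError (missing key) / ValueError (value
-- absent) there; both are unreachable in A's runs, the dead branches keep g unchanged.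
def rmNbr (g : PySem.Dict Int (List Int)) (n v : Int) : PySem.Dict Int (List Int) :=
  match g.get? n with
  | some xs => g.insert n ((PySem.List.remove? xs v).getD xs)
  | none => g

-- 'for neighbor in graph[vertex]: graph[neighbor].remove(vertex)' then 'del graph[vertex]'.
-- Python iterates the live list graph[vertex]; it can only be mutated mid-iteration when
-- neighbor == vertex, and a removable vertex never occurs in its own list (a self-loop
-- contributes 2 to its length), so iterating the looked-up list is exact here.
def removeVertex (g : PySem.Dict Int (List Int)) (v : Int) : PySem.Dict Int (List Int) :=
  (((g.getD v []).foldl (fun g n => rmNbr g n v) g)).erase v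


lemma size_rmNbr (g : PySem.Dict Int (List Int)) (n v : Int) : (rmNbr g n v).size = g.size := by
  unfold rmNbr
  cases h : g.get? n with
  | none => rfl
  | some xs =>
    have hc : g.contains n = true := by rw [PySem.Dict.contains_eq_isSome_get?, h]; rfl
    simp [PySem.Dict.size_insert, hc]

lemma size_foldl_rmNbr (l : List Int) (g : PySem.Dict Int (List Int)) (v : Int) :
    (l.foldl (fun g n => rmNbr g n v) g).size = g.size := by
  induction l generalizing g with
  | nil => rfl
  | cons n t ih => simp [List.foldl_cons, ih, size_rmNbr]

lemma size_removeVertex_le (g : PySem.Dict Int (List Int)) (v : Int) :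
    (removeVertex g v).size ≤ g.size := by
  unfold removeVertex
  calc ((((g.getD v []).foldl (fun g n => rmNbr g n v) g)).erase v).size
      ≤ (((g.getD v []).foldl (fun g n => rmNbr g n v) g)).size := by
        simp [PySem.Dict.erase, PySem.Dict.size]
        exact List.length_filter_le _ _
    _ = g.size := size_foldl_rmNbr _ _ _

lemma keys_rmNbr (g : PySem.Dict Int (List Int)) (n v : Int) : (rmNbr g n v).keys = g.keys := by
  unfold rmNbr
  cases h : g.get? n with
  | none => rfl
  | some xs =>
    have hc : g.contains n = true := by rw [PySem.Dict.contains_eq_isSome_get?, h]; rfl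
    exact PySem.Dict.keys_insert_of_contains _ _ hc

lemma keys_foldl_rmNbr (l : List Int) (g : PySem.Dict Int (List Int)) (v : Int) :
    (l.foldl (fun g n => rmNbr g n v) g).keys = g.keys := by
  induction l generalizing g with
  | nil => rfl
  | cons n t ih => simp [List.foldl_cons, ih, keys_rmNbr]

lemma contains_foldl_rmNbr (l : List Int) (g : PySem.Dict Int (List Int)) (v w : Int) :
    (l.foldl (fun g n => rmNbr g n v) g).contains w = g.contains w := by
  rw [PySem.Dict.contains_eq_decide_mem_keys, PySem.Dict.contains_eq_decide_mem_keys,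
    keys_foldl_rmNbr]

lemma size_removeVertex_lt (g : PySem.Dict Int (List Int)) (v : Int)
    (h : g.contains v = true) : (removeVertex g v).size < g.size := by
  unfold removeVertex
  set g1 := ((g.getD v []).foldl (fun g n => rmNbr g n v) g) with hg1
  have hc : g1.contains v = true := by rw [hg1, contains_foldl_rmNbr]; exact h
  have : (g1.erase v).size < g1.size := by
    simp only [PySem.Dict.erase, PySem.Dict.size]
    refine List.length_filter_lt_length_iff_exists.mpr ?_
    simp only [PySem.Dict.contains] at hc
    rw [List.any_eq_true] at hc
    obtain ⟨p, hp, hpv⟩ := hc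
    exact ⟨p, hp, by simp [hpv]⟩
  calc (g1.erase v).size < g1.size := this
    _ = g.size := by rw [hg1, size_foldl_rmNbr]

lemma size_foldl_removeVertex_le (l : List Int) (g : PySem.Dict Int (List Int)) :
    (l.foldl removeVertex g).size ≤ g.size := by
  induction l generalizing g with
  | nil => exact le_refl _
  | cons n t ih => exact le_trans (ih _) (size_removeVertex_le _ _)

lemma size_foldl_removeVertex_lt (l : List Int) (g : PySem.Dict Int (List Int))
    (hne : l ≠ []) (hmem : ∀ v ∈ l, g.contains v = true) :
    (l.foldl removeVertex g).size < g.size := by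
  cases l with
  | nil => exact absurd rfl hne
  | cons v t =>
    calc (List.foldl removeVertex (removeVertex g v) t).size
        ≤ (removeVertex g v).size := size_foldl_removeVertex_le _ _
      _ < g.size := size_removeVertex_lt _ _ (hmem v (by simp))

-- the 'while True' loop of A
def loopA (g : PySem.Dict Int (List Int)) (seconds : Int) :
    PySem.Dict Int (List Int) × Int :=
  let to_remove := g.keys.filter (fun v => PySem.List.len (g.getD v []) ≤ 1)
  if h : to_remove = [] then (g, seconds)
  else loopA (to_remove.foldl removeVertex g) (seconds + 1)
termination_by g.size
decreasing_by
  exact size_foldl_removeVertex_lt _ g h (by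
    intro v hv
    have hk : v ∈ g.keys := (List.mem_filter.mp hv).1
    simpa [PySem.Dict.contains_eq_decide_mem_keys] using hk)

def buildGraph (A B : List Int) : PySem.Dict Int (List Int) :=
  (PySem.List.pyRange 0 (PySem.List.len A) 1).foldl (fun g i =>
    -- A[i] / B[i]: the default 0 is dead code — Pre_ excludes the IndexError case
    let a := (PySem.List.pyGet? A i).getD 0
    let b := (PySem.List.pyGet? B i).getD 0
    let g := if g.contains a then g else g.insert a []
    let g := if g.contains b then g else g.insert b []
    let g := g.modify a [] (· ++ [b])
    g.modify b [] (· ++ [a])) PySem.Dict.empty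

def solution (N : Int) (A : List Int) (B : List Int) : Int :=
  let graph := buildGraph A B
  let r := loopA graph 0
  if r.1.items ≠ [] then r.2 else 0

-- ===== PORT B =====
-- deg = {}; for a, b in edges: deg[a] = deg.get(a, 0) + 1; deg[b] = deg.get(b, 0) + 1
def degDict (E : List (Int × Int)) : PySem.Dict Int Int :=
  E.foldl (fun d e => (d.modify e.1 0 (· + 1)).modify e.2 0 (· + 1)) PySem.Dict.empty

-- leaves = [v for v in alive if deg.get(v, 0) <= 1]
def leavesOf (E : List (Int × Int)) (alive : List Int) : List Int :=
  alive.filter (fun v => (degDict E).getD v 0 ≤ 1)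

-- the 'while True' loop of B
def loopB (E : List (Int × Int)) (alive : List Int) (seconds : Int) : Int :=
  if h : leavesOf E alive = [] then (if alive = [] then 0 else seconds)
  else
    loopB (E.filter (fun e => !(PySem.Set.contains (PySem.Set.ofList (leavesOf E alive)) e.1) &&
                              !(PySem.Set.contains (PySem.Set.ofList (leavesOf E alive)) e.2)))
          (alive.filter (fun v => !(PySem.Set.contains (PySem.Set.ofList (leavesOf E alive)) v)))
          (seconds + 1)
termination_by alive.length
decreasing_by
  obtain ⟨v, hv⟩ := List.exists_mem_of_ne_nil _ h
  have hc := (PySem.Set.contains_iff (PySem.Set.ofList (leavesOf E alive)) v).mpr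
    ((PySem.Set.mem_ofList _ _).mpr hv)
  simp only [List.length_unattach]
  rw [← List.length_attach (l := alive)]
  exact List.length_filter_lt_length_iff_exists.mpr
    ⟨⟨v, (List.mem_filter.mp hv).1⟩, List.mem_attach _ _, by simp; exact hv⟩

-- one pass over the edges: alive keeps first-seen order, seen is the membership set
def collectAlive (edges : List (Int × Int)) : List Int × PySem.Set Int :=
  edges.foldl (fun (p : List Int × PySem.Set Int) e =>
    let p := if PySem.Set.contains p.2 e.1 then p else (p.1 ++ [e.1], PySem.Set.add p.2 e.1)
    if PySem.Set.contains p.2 e.2 then p else (p.1 ++ [e.2], PySem.Set.add p.2 e.2))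
    ([], PySem.Set.empty)

def solution_alt (N : Int) (A : List Int) (B : List Int) : Int :=
  let edges := A.zip B
  let alive := (collectAlive edges).1
  loopB edges alive 0

-- ===== PRECONDITION & SPEC =====
-- Pre_ excludes exactly the inputs with len(A) > len(B), where A raises IndexError at B[i].
def Pre_solution (N : Int) (A : List Int) (B : List Int) : Prop := A.length ≤ B.length
instance (N : Int) (A : List Int) (B : List Int) : Decidable (Pre_solution N A B) := by
  unfold Pre_solution; infer_instance
def pvWitness_solution : Int × List Int × List Int := (3, [1, 2], [2, 3])

def Spec_solution (N : Int) (A : List Int) (B : List Int) (out : Int) : Prop :=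
  out = solution_alt N A B
instance (N : Int) (A : List Int) (B : List Int) (out : Int) : Decidable (Spec_solution N A B out) := by
  unfold Spec_solution; infer_instance

-- ===== CLAIM (what is proved, stated in full; the proofs are below) =====
def Claim_equal_solution : Prop := ∀ (N : Int) (A : List Int) (B : List Int),
  Dom_solution N A B → Pre_solution N A B → Spec_solution N A B (solution N A B)

-- ===== LEMMAS AND PROOFS =====
def addIfAbsent (al : List Int) (x : Int) : List Int :=
  if al.contains x then al else al ++ [x]

lemma collectAlive_eq (E : List (Int × Int)) :
    collectAlive E = (E.foldl (fun al e => addIfAbsent (addIfAbsent al e.1) e.2) [],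
      E.foldl (fun al e => addIfAbsent (addIfAbsent al e.1) e.2) []) := by
  unfold collectAlive
  suffices hgen : ∀ (al : List Int),
      E.foldl (fun (p : List Int × PySem.Set Int) e =>
        let p := if PySem.Set.contains p.2 e.1 then p else (p.1 ++ [e.1], PySem.Set.add p.2 e.1)
        if PySem.Set.contains p.2 e.2 then p else (p.1 ++ [e.2], PySem.Set.add p.2 e.2)) (al, al)
      = (E.foldl (fun al e => addIfAbsent (addIfAbsent al e.1) e.2) al,
         E.foldl (fun al e => addIfAbsent (addIfAbsent al e.1) e.2) al) by
    exact hgen []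
  induction E with
  | nil => intro al; rfl
  | cons e E ih =>
    intro al
    rw [List.foldl_cons, List.foldl_cons]
    have hstep : ((fun (p : List Int × PySem.Set Int) e =>
        let p := if PySem.Set.contains p.2 e.1 then p else (p.1 ++ [e.1], PySem.Set.add p.2 e.1)
        if PySem.Set.contains p.2 e.2 then p else (p.1 ++ [e.2], PySem.Set.add p.2 e.2)) (al, al) e)
        = (addIfAbsent (addIfAbsent al e.1) e.2, addIfAbsent (addIfAbsent al e.1) e.2) := by
      show (let p := if PySem.Set.contains al e.1 then (al, al)
              else (al ++ [e.1], PySem.Set.add al e.1)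
            if PySem.Set.contains p.2 e.2 then p else (p.1 ++ [e.2], PySem.Set.add p.2 e.2)) = _
      rw [PySem.Set.contains_eq_listContains]
      unfold addIfAbsent
      by_cases h1 : al.contains e.1 = true
      · rw [if_pos h1, if_pos h1]
        show (if PySem.Set.contains al e.2 then (al, al)
              else (al ++ [e.2], PySem.Set.add al e.2)) = _
        rw [PySem.Set.contains_eq_listContains]
        by_cases h2 : al.contains e.2 = true
        · rw [if_pos h2, if_pos h2]
        · rw [if_neg h2, if_neg h2]
          show (al ++ [e.2], if al.contains e.2 = true then al else al ++ [e.2]) = _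
          rw [if_neg h2]
      · rw [if_neg h1, if_neg h1]
        show (if PySem.Set.contains (PySem.Set.add al e.1) e.2
                then (al ++ [e.1], PySem.Set.add al e.1)
              else ((al ++ [e.1]) ++ [e.2], PySem.Set.add (PySem.Set.add al e.1) e.2)) = _
        have hadd : PySem.Set.add al e.1 = al ++ [e.1] := by
          show (if al.contains e.1 = true then al else al ++ [e.1]) = _
          rw [if_neg h1]
        rw [hadd, PySem.Set.contains_eq_listContains]
        by_cases h2 : (al ++ [e.1]).contains e.2 = true
        · rw [if_pos h2, if_pos h2]
        · rw [if_neg h2, if_neg h2]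
          show ((al ++ [e.1]) ++ [e.2],
              if (al ++ [e.1]).contains e.2 = true then al ++ [e.1] else (al ++ [e.1]) ++ [e.2]) = _
          rw [if_neg h2]
    rw [← ih (addIfAbsent (addIfAbsent al e.1) e.2)]
    exact congrArg (fun p => List.foldl (fun (p : List Int × PySem.Set Int) e =>
      let p := if PySem.Set.contains p.2 e.1 then p else (p.1 ++ [e.1], PySem.Set.add p.2 e.1)
      if PySem.Set.contains p.2 e.2 then p else (p.1 ++ [e.2], PySem.Set.add p.2 e.2)) p E) hstep

def nbrs (E : List (Int × Int)) (w : Int) : List Int :=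
  E.flatMap (fun e => (if e.1 = w then [e.2] else []) ++ (if e.2 = w then [e.1] else []))

lemma nbrs_nil (w : Int) : nbrs [] w = [] := rfl

lemma nbrs_cons (e : Int × Int) (E : List (Int × Int)) (w : Int) :
    nbrs (e :: E) w =
      ((if e.1 = w then [e.2] else []) ++ (if e.2 = w then [e.1] else [])) ++ nbrs E w := by
  simp [nbrs]

lemma nbrs_append (E₁ E₂ : List (Int × Int)) (w : Int) :
    nbrs (E₁ ++ E₂) w = nbrs E₁ w ++ nbrs E₂ w := by
  simp [nbrs]

lemma nbrs_eq_nil (E : List (Int × Int)) (w : Int) (h : ∀ e ∈ E, e.1 ≠ w ∧ e.2 ≠ w) :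
    nbrs E w = [] := by
  induction E with
  | nil => rfl
  | cons e E ih =>
    have he := h e (by simp)
    rw [nbrs_cons, ih (fun e' he' => h e' (by simp [he']))]
    simp [he.1, he.2]


lemma degDict_getD_aux (E : List (Int × Int)) (v : Int) :
    ∀ d : PySem.Dict Int Int,
      (E.foldl (fun d e => (d.modify e.1 0 (· + 1)).modify e.2 0 (· + 1)) d).getD v 0
        = d.getD v 0 + ((nbrs E v).length : Int) := by
  induction E with
  | nil => intro d; simp [nbrs_nil]
  | cons e E ih =>
    intro d
    rcases e with ⟨a, b⟩
    rw [List.foldl_cons, ih, nbrs_cons]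
    simp only [PySem.Dict.getD_modify, List.length_append,
      apply_ite (List.length (α := Int)), List.length_singleton, List.length_nil]
    push_cast
    split_ifs <;> subst_vars <;> omega

lemma degDict_getD (E : List (Int × Int)) (v : Int) :
    (degDict E).getD v 0 = ((nbrs E v).length : Int) := by
  rw [degDict, degDict_getD_aux]
  simp

lemma count_nbrs_symm (E : List (Int × Int)) (v w : Int) (hvw : v ≠ w) :
    (nbrs E v).count w = (nbrs E w).count v := by
  induction E with
  | nil => rfl
  | cons e E ih =>
    rw [nbrs_cons, nbrs_cons, List.count_append, List.count_append, ih]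
    congr 1
    by_cases h1 : e.1 = v <;> by_cases h2 : e.2 = v <;>
      by_cases h3 : e.1 = w <;> by_cases h4 : e.2 = w <;>
      simp_all <;> omega

lemma nbrs_filter (E : List (Int × Int)) (v w : Int) (hvw : w ≠ v) :
    nbrs (E.filter (fun e => !(e.1 == v) && !(e.2 == v))) w
      = (nbrs E w).filter (fun x => !(x == v)) := by
  induction E with
  | nil => rfl
  | cons e E ih =>
    rw [nbrs_cons, List.filter_append, List.filter_cons]
    by_cases hk : (!(e.1 == v) && !(e.2 == v)) = true
    · rw [if_pos hk, nbrs_cons, ih]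
      simp only [bne, Bool.and_eq_true, Bool.not_eq_true', beq_eq_false_iff_ne] at hk
      congr 1
      by_cases h1 : e.1 = w <;> by_cases h2 : e.2 = w <;>
        simp [h1, h2, hk.1, hk.2, hvw]
    · rw [if_neg hk, ih]
      simp only [Bool.and_eq_true, Bool.not_eq_true', beq_eq_false_iff_ne, not_and_or,
        not_not] at hk
      have : ((if e.1 = w then [e.2] else []) ++ (if e.2 = w then [e.1] else [])).filter
          (fun x => !(x == v)) = [] := by
        rcases hk with h | h <;>
          by_cases h1 : e.1 = w <;> by_cases h2 : e.2 = w <;>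
          simp_all
      rw [this, List.nil_append]


def rmIter (xs : List Int) (v : Int) : Nat → List Int
  | 0 => xs
  | (k+1) => rmIter ((PySem.List.remove? xs v).getD xs) v k

lemma rmIter_count (v : Int) : ∀ (k : Nat) (xs : List Int), xs.count v = k →
    rmIter xs v k = xs.filter (fun x => !(x == v)) := by
  intro k
  induction k with
  | zero =>
    intro xs h0
    have hnot : v ∉ xs := by
      rw [← List.count_eq_zero]; exact h0
    rw [rmIter]
    exact (List.filter_eq_self.mpr (fun x hx => by
      simp; rintro rfl; exact hnot hx)).symm
  | succ k ih =>
    intro xs hk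
    have hv : v ∈ xs := by
      have : 0 < xs.count v := by omega
      exact List.count_pos_iff.mp this
    rw [rmIter, PySem.List.remove?_eq_some_erase xs v hv]
    simp only [Option.getD_some]
    rw [ih (xs.erase v) (by rw [List.count_erase_self]; omega)]
    obtain ⟨l1, l2, hnl1, hxs, herase⟩ := List.exists_erase_eq hv
    rw [herase, hxs]
    simp [List.filter_append]

lemma getD_foldl_rmNbr (v w : Int) : ∀ (l : List Int) (g : PySem.Dict Int (List Int)),
    ((l.foldl (fun g n => rmNbr g n v) g)).getD w [] = rmIter (g.getD w []) v (l.count w) := by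
  intro l
  induction l with
  | nil => intro g; rfl
  | cons n t ih =>
    intro g
    rw [List.foldl_cons, ih]
    by_cases hnw : n = w
    · subst hnw
      have hcount : (n :: t).count n = t.count n + 1 := by simp
      rw [hcount]
      have hstep : (rmNbr g n v).getD n [] =
          (PySem.List.remove? (g.getD n []) v).getD (g.getD n []) := by
        unfold rmNbr
        cases hg : g.get? n with
        | none =>
          have : g.getD n [] = [] := by
            rw [PySem.Dict.getD_eq_get?_getD, hg]; rfl
          simp [this, PySem.List.remove?]
        | some xs =>
          have hx : g.getD n [] = xs := by
            rw [PySem.Dict.getD_eq_get?_getD, hg]; rfl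
          rw [hx, PySem.Dict.getD_insert_self]
      rw [hstep]
      rfl
    · have hcount : (n :: t).count w = t.count w := by
        simp [List.count_cons, hnw]
      rw [hcount]
      have hstep : (rmNbr g n v).getD w [] = g.getD w [] := by
        unfold rmNbr
        cases hg : g.get? n with
        | none => rfl
        | some xs =>
          rw [PySem.Dict.getD_insert, if_neg (fun h => hnw h.symm)]
      rw [hstep]

lemma find?_filter_ne (l : List (Int × List Int)) (v w : Int) (hvw : w ≠ v) :
    List.find? (fun p => p.1 == w) (l.filter (fun p => !(p.1 == v)))
      = List.find? (fun p => p.1 == w) l := by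
  induction l with
  | nil => rfl
  | cons p t ih =>
    rw [List.filter_cons]
    by_cases hp : p.1 = v
    · have h1 : (!(p.1 == v)) = false := by simp [hp]
      have h2 : (p.1 == w) = false := by simp [hp]; exact fun h => hvw h.symm
      rw [if_neg (by simp [h1]), List.find?_cons, h2, ih]
    · have h1 : (!(p.1 == v)) = true := by simp [hp]
      rw [if_pos h1, List.find?_cons, List.find?_cons]
      cases hw : (p.1 == w) with
      | true => rfl
      | false => exact ih

lemma get?_erase_of_ne (d : PySem.Dict Int (List Int)) (v w : Int) (hvw : w ≠ v) :
    (d.erase v).get? w = d.get? w := by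
  show Option.map _ (List.find? _ (List.filter _ d.items)) = _
  rw [find?_filter_ne d.items v w hvw]
  rfl

lemma getD_removeVertex_ne (g : PySem.Dict Int (List Int)) (v w : Int) (hvw : w ≠ v) :
    (removeVertex g v).getD w [] = rmIter (g.getD w []) v ((g.getD v []).count w) := by
  unfold removeVertex
  rw [PySem.Dict.getD_eq_get?_getD, get?_erase_of_ne _ v w hvw,
    ← PySem.Dict.getD_eq_get?_getD, getD_foldl_rmNbr]

lemma keys_erase (d : PySem.Dict Int (List Int)) (v : Int) :
    (d.erase v).keys = d.keys.filter (fun k => !(k == v)) := by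
  show (List.filter _ d.items).map _ = (d.items.map _).filter _
  rw [List.filter_map]
  exact congrArg _ (List.filter_congr (fun x _ => rfl))

lemma keys_removeVertex (g : PySem.Dict Int (List Int)) (v : Int) :
    (removeVertex g v).keys = g.keys.filter (fun k => !(k == v)) := by
  unfold removeVertex
  rw [keys_erase, keys_foldl_rmNbr]


def INV (g : PySem.Dict Int (List Int)) (E : List (Int × Int)) (alive : List Int) : Prop :=
  alive.Nodup ∧ g.keys.Nodup ∧ (∀ v : Int, v ∈ g.keys ↔ v ∈ alive) ∧
  (∀ v ∈ alive, g.getD v [] = nbrs E v) ∧ (∀ e ∈ E, e.1 ∈ alive ∧ e.2 ∈ alive)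

lemma removeVertex_inv {g : PySem.Dict Int (List Int)} {E : List (Int × Int)}
    {alive : List Int} (h : INV g E alive) (v : Int) (hv : v ∈ alive) :
    INV (removeVertex g v) (E.filter (fun e => !(e.1 == v) && !(e.2 == v)))
      (alive.filter (fun x => !(x == v))) := by
  obtain ⟨hnd, hknd, hmem, hgetD, hends⟩ := h
  refine ⟨hnd.filter _, ?_, ?_, ?_, ?_⟩
  · rw [keys_removeVertex]; exact hknd.filter _
  · intro w
    rw [keys_removeVertex, List.mem_filter, List.mem_filter, hmem]
  · intro w hw
    rw [List.mem_filter] at hw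
    obtain ⟨hwa, hwv⟩ := hw
    have hwv' : w ≠ v := by simpa using hwv
    rw [getD_removeVertex_ne g v w hwv', hgetD w hwa, hgetD v hv,
      count_nbrs_symm E v w (fun hh => hwv' hh.symm),
      rmIter_count v _ _ rfl, nbrs_filter E v w hwv']
  · intro e he
    rw [List.mem_filter] at he
    obtain ⟨heE, hek⟩ := he
    simp only [Bool.and_eq_true, Bool.not_eq_true', beq_eq_false_iff_ne] at hek
    obtain ⟨h1, h2⟩ := hends e heE
    constructor <;> rw [List.mem_filter] <;> simp [h1, h2, hek.1, hek.2]

lemma foldl_removeVertex_inv : ∀ (rem : List Int) (g : PySem.Dict Int (List Int))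
    (E : List (Int × Int)) (alive : List Int), INV g E alive → rem.Nodup →
    (∀ v ∈ rem, v ∈ alive) →
    INV (rem.foldl removeVertex g)
      (E.filter (fun e => !(rem.contains e.1) && !(rem.contains e.2)))
      (alive.filter (fun x => !(rem.contains x))) := by
  intro rem
  induction rem with
  | nil =>
    intro g E alive h _ _
    simpa using h
  | cons v t ih =>
    intro g E alive h hnd hsub
    rw [List.foldl_cons]
    have h1 := removeVertex_inv h v (hsub v (by simp))
    have h2 := ih (removeVertex g v) _ _ h1 hnd.of_cons (by
      intro u hu
      rw [List.mem_filter]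
      refine ⟨hsub u (by simp [hu]), ?_⟩
      have : u ≠ v := by
        rintro rfl; exact (List.nodup_cons.mp hnd).1 hu
      simpa using this)
    have eE : ((E.filter (fun e => !(e.1 == v) && !(e.2 == v))).filter
          (fun e => !(t.contains e.1) && !(t.contains e.2)))
        = E.filter (fun e => !((v :: t).contains e.1) && !((v :: t).contains e.2)) := by
      rw [List.filter_filter]
      refine List.filter_congr ?_
      intro e _
      simp only [List.contains_cons]
      by_cases hA : e.1 = v <;> by_cases hB : e.2 = v <;>
        simp [hA, hB, Bool.and_comm, Bool.and_left_comm, Bool.and_assoc]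
    have eA : ((alive.filter (fun x => !(x == v))).filter (fun x => !(t.contains x)))
        = alive.filter (fun x => !((v :: t).contains x)) := by
      rw [List.filter_filter]
      refine List.filter_congr ?_
      intro x _
      simp only [List.contains_cons]
      by_cases hx : x = v <;> simp [hx, Bool.and_comm]
    rw [eE, eA] at h2
    exact h2

lemma to_remove_mem {g : PySem.Dict Int (List Int)} {E : List (Int × Int)}
    {alive : List Int} (h : INV g E alive) (v : Int) :
    v ∈ g.keys.filter (fun v => PySem.List.len (g.getD v []) ≤ 1)
      ↔ v ∈ leavesOf E alive := by
  obtain ⟨hnd, hknd, hmem, hgetD, hends⟩ := h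
  rw [leavesOf, List.mem_filter, List.mem_filter]
  constructor
  · rintro ⟨hk, hle⟩
    have hva := (hmem v).mp hk
    refine ⟨hva, ?_⟩
    rw [degDict_getD, ← hgetD v hva, ← PySem.List.len_eq]
    exact hle
  · rintro ⟨hva, hle⟩
    refine ⟨(hmem v).mpr hva, ?_⟩
    rw [PySem.List.len_eq, hgetD v hva, ← degDict_getD]
    exact hle

lemma items_nil_iff_alive_nil {g : PySem.Dict Int (List Int)} {E : List (Int × Int)}
    {alive : List Int} (h : INV g E alive) : g.items = [] ↔ alive = [] := by
  obtain ⟨hnd, hknd, hmem, hgetD, hends⟩ := h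
  constructor
  · intro hi
    rw [List.eq_nil_iff_forall_not_mem]
    intro v hv
    have : v ∈ g.keys := (hmem v).mpr hv
    rw [PySem.Dict.keys, hi] at this
    simp at this
  · intro ha
    have : g.keys = [] := by
      rw [List.eq_nil_iff_forall_not_mem]
      intro v hv
      have := (hmem v).mp hv
      rw [ha] at this
      simp at this
    have := congrArg List.length this
    rw [PySem.Dict.keys, List.length_map] at this
    exact List.eq_nil_of_length_eq_zero this

lemma loop_terminal {g : PySem.Dict Int (List Int)} {E : List (Int × Int)}
    {alive : List Int} (hinv : INV g E alive) (s : Int)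
    (hto : g.keys.filter (fun v => PySem.List.len (g.getD v []) ≤ 1) = []) :
    (if (loopA g s).1.items ≠ [] then (loopA g s).2 else 0) = loopB E alive s := by
  have hl : leavesOf E alive = [] := by
    rw [List.eq_nil_iff_forall_not_mem]
    intro v hv
    have := (to_remove_mem hinv v).mpr hv
    rw [hto] at this
    simp at this
  have hA : loopA g s = (g, s) := by
    unfold loopA
    simp only [hto]
    rfl
  have hB : loopB E alive s = if alive = [] then 0 else s := by
    unfold loopB
    simp [hl]
  rw [hA, hB]
  by_cases ha : alive = []
  · simp [ha, (items_nil_iff_alive_nil hinv).mpr ha]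
  · have : g.items ≠ [] := fun hi => ha ((items_nil_iff_alive_nil hinv).mp hi)
    simp [ha, this]

lemma loop_eq : ∀ (n : Nat) (alive : List Int) (g : PySem.Dict Int (List Int))
    (E : List (Int × Int)) (s : Int), alive.length ≤ n → INV g E alive →
    (if (loopA g s).1.items ≠ [] then (loopA g s).2 else 0) = loopB E alive s := by
  intro n
  induction n with
  | zero =>
    intro alive g E s hlen hinv
    have ha : alive = [] := List.eq_nil_of_length_eq_zero (by omega)
    refine loop_terminal hinv s ?_
    rw [List.eq_nil_iff_forall_not_mem]
    intro v hv
    have := (to_remove_mem hinv v).mp hv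
    rw [leavesOf, ha] at this
    simp at this
  | succ n ih =>
    intro alive g E s hlen hinv
    by_cases hto : g.keys.filter (fun v => PySem.List.len (g.getD v []) ≤ 1) = []
    · exact loop_terminal hinv s hto
    · set to_remove := g.keys.filter (fun v => PySem.List.len (g.getD v []) ≤ 1) with hremdef
      have hlv : leavesOf E alive ≠ [] := by
        intro hl
        refine hto (List.eq_nil_iff_forall_not_mem.mpr (fun v hv => ?_))
        have := (to_remove_mem hinv v).mp hv
        rw [hl] at this
        simp at this
      obtain ⟨hnd, hknd, hmem, hgetD, hends⟩ := hinv
      have hinv' : INV g E alive := ⟨hnd, hknd, hmem, hgetD, hends⟩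
      -- the two rounds remove the same vertex set
      have hcont : ∀ x : Int, to_remove.contains x
          = PySem.Set.contains (PySem.Set.ofList (leavesOf E alive)) x := by
        intro x
        have hlnd : (leavesOf E alive).Nodup := by
          rw [leavesOf]; exact hnd.filter _
        rw [PySem.Set.contains_eq_listContains,
          PySem.Set.ofList_eq_self_of_nodup _ hlnd]
        by_cases hx : x ∈ to_remove
        · rw [List.contains_iff_mem.mpr hx,
            Eq.comm, List.contains_iff_mem]
          exact (to_remove_mem hinv' x).mp hx
        · have hx' : x ∉ leavesOf E alive := fun hc => hx ((to_remove_mem hinv' x).mpr hc)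
          rw [Bool.eq_iff_iff]
          simp [hx, hx']
      have hA : loopA g s = loopA (to_remove.foldl removeVertex g) (s + 1) := by
        conv_lhs => unfold loopA
        simp only [← hremdef]
        rw [dif_neg hto]
      have hB0 : loopB E alive s =
          loopB (E.filter (fun e =>
                  !(PySem.Set.contains (PySem.Set.ofList (leavesOf E alive)) e.1) &&
                  !(PySem.Set.contains (PySem.Set.ofList (leavesOf E alive)) e.2)))
                (alive.filter (fun x =>
                  !(PySem.Set.contains (PySem.Set.ofList (leavesOf E alive)) x))) (s + 1) := by
        conv_lhs => unfold loopB
        rw [dif_neg hlv]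
      have hE2 : E.filter (fun e =>
              !(PySem.Set.contains (PySem.Set.ofList (leavesOf E alive)) e.1) &&
              !(PySem.Set.contains (PySem.Set.ofList (leavesOf E alive)) e.2))
          = E.filter (fun e => !(to_remove.contains e.1) && !(to_remove.contains e.2)) :=
        List.filter_congr (fun e _ => by rw [hcont e.1, hcont e.2])
      have hA2 : alive.filter (fun x =>
              !(PySem.Set.contains (PySem.Set.ofList (leavesOf E alive)) x))
          = alive.filter (fun x => !(to_remove.contains x)) :=
        List.filter_congr (fun x _ => by rw [hcont x])
      rw [hA, hB0, hE2, hA2]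
      have hinv2 := foldl_removeVertex_inv to_remove g E alive hinv' (hknd.filter _)
        (fun v hv => (hmem v).mp (List.mem_filter.mp hv).1)
      refine ih _ _ _ _ ?_ hinv2
      -- the filtered alive list got strictly shorter
      obtain ⟨v, hv⟩ := List.exists_mem_of_ne_nil _ hto
      have hva : v ∈ alive := (hmem v).mp (List.mem_filter.mp hv).1
      have hlt : (alive.filter (fun x => !(to_remove.contains x))).length < alive.length := by
        refine List.length_filter_lt_length_iff_exists.mpr ⟨v, hva, ?_⟩
        simp [hv]
      omega

-- proof-only restatement of the loop body of buildGraph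
def stepG (g : PySem.Dict Int (List Int)) (a b : Int) : PySem.Dict Int (List Int) :=
  let g1 := if g.contains a then g else g.insert a []
  let g2 := if g1.contains b then g1 else g1.insert b []
  (g2.modify a [] (· ++ [b])).modify b [] (· ++ [a])

lemma ens_getD (g : PySem.Dict Int (List Int)) (a w : Int) :
    ((if g.contains a then g else g.insert a []) : PySem.Dict Int (List Int)).getD w []
      = g.getD w [] := by
  by_cases hc : g.contains a = true
  · simp [hc]
  · rw [if_neg hc, PySem.Dict.getD_insert]
    by_cases hw : w = a
    · subst hw
      rw [if_pos rfl, PySem.Dict.getD_of_not_contains _ _ (by simpa using hc)]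
    · rw [if_neg hw]

lemma ens_keys_mem (g : PySem.Dict Int (List Int)) (a w : Int) :
    w ∈ ((if g.contains a then g else g.insert a []) : PySem.Dict Int (List Int)).keys
      ↔ w ∈ g.keys ∨ w = a := by
  by_cases hc : g.contains a = true
  · rw [if_pos hc]
    constructor
    · exact Or.inl
    · rintro (h | rfl)
      · exact h
      · exact (PySem.Dict.contains_iff_mem_keys _ _).mp hc
  · rw [if_neg (by simpa using hc), PySem.Dict.keys_insert_of_not_contains _ _ (by simpa using hc)]
    simp

lemma ens_keys_nodup (g : PySem.Dict Int (List Int)) (a : Int) (h : g.keys.Nodup) :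
    ((if g.contains a then g else g.insert a []) : PySem.Dict Int (List Int)).keys.Nodup := by
  by_cases hc : g.contains a = true
  · rwa [if_pos hc]
  · rw [if_neg (by simpa using hc), PySem.Dict.keys_insert_of_not_contains _ _ (by simpa using hc)]
    rw [List.nodup_append]
    refine ⟨h, List.nodup_singleton _, ?_⟩
    intro x hx y hy
    rw [List.mem_singleton] at hy
    subst hy
    exact fun heq =>
      absurd ((PySem.Dict.contains_iff_mem_keys _ _).mpr (heq ▸ hx)) (by simpa using hc)

lemma ens_contains_self (g : PySem.Dict Int (List Int)) (a : Int) :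
    ((if g.contains a then g else g.insert a []) : PySem.Dict Int (List Int)).contains a = true := by
  by_cases hc : g.contains a = true
  · rwa [if_pos hc]
  · rw [if_neg (by simpa using hc)]
    exact PySem.Dict.contains_insert_self _ _ _

lemma ens_contains_mono (g : PySem.Dict Int (List Int)) (a x : Int)
    (h : g.contains x = true) :
    ((if g.contains a then g else g.insert a []) : PySem.Dict Int (List Int)).contains x = true := by
  by_cases hc : g.contains a = true
  · rwa [if_pos hc]
  · rw [if_neg (by simpa using hc), PySem.Dict.contains_insert]
    simp [h]

lemma stepG_getD (g : PySem.Dict Int (List Int)) (a b w : Int) :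
    (stepG g a b).getD w []
      = g.getD w [] ++ ((if a = w then [b] else []) ++ (if b = w then [a] else [])) := by
  unfold stepG
  set g1 := ((if g.contains a then g else g.insert a []) : PySem.Dict Int (List Int)) with hg1
  set g2 := ((if g1.contains b then g1 else g1.insert b []) : PySem.Dict Int (List Int)) with hg2
  have hgd : ∀ x : Int, g2.getD x [] = g.getD x [] := by
    intro x
    rw [hg2, ens_getD, hg1, ens_getD]
  rw [PySem.Dict.getD_modify, PySem.Dict.getD_modify, PySem.Dict.getD_modify]
  by_cases h1 : w = a <;> by_cases h2 : w = b <;> by_cases h3 : b = a <;>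
    simp_all [hgd] <;> omega

lemma stepG_keys_mem (g : PySem.Dict Int (List Int)) (a b w : Int) :
    w ∈ (stepG g a b).keys ↔ w ∈ g.keys ∨ w = a ∨ w = b := by
  unfold stepG
  set g1 := ((if g.contains a then g else g.insert a []) : PySem.Dict Int (List Int)) with hg1
  set g2 := ((if g1.contains b then g1 else g1.insert b []) : PySem.Dict Int (List Int)) with hg2
  have hca : g1.contains a = true := by rw [hg1]; exact ens_contains_self g a
  have hca2 : g2.contains a = true := by rw [hg2]; exact ens_contains_mono g1 b a hca
  have hcb2 : g2.contains b = true := by rw [hg2]; exact ens_contains_self g1 b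
  have hma : (g2.modify a [] (· ++ [b])).contains b = true := by
    rw [PySem.Dict.contains_modify]
    simp [hcb2]
  rw [PySem.Dict.keys_modify, PySem.Dict.keys_insert_of_contains _ _ hma,
    PySem.Dict.keys_modify, PySem.Dict.keys_insert_of_contains _ _ hca2]
  rw [hg2, ens_keys_mem, hg1, ens_keys_mem]
  tauto

lemma stepG_keys_nodup (g : PySem.Dict Int (List Int)) (a b : Int) (h : g.keys.Nodup) :
    (stepG g a b).keys.Nodup := by
  unfold stepG
  set g1 := ((if g.contains a then g else g.insert a []) : PySem.Dict Int (List Int)) with hg1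
  set g2 := ((if g1.contains b then g1 else g1.insert b []) : PySem.Dict Int (List Int)) with hg2
  have hca : g1.contains a = true := by rw [hg1]; exact ens_contains_self g a
  have hca2 : g2.contains a = true := by rw [hg2]; exact ens_contains_mono g1 b a hca
  have hcb2 : g2.contains b = true := by rw [hg2]; exact ens_contains_self g1 b
  have hma : (g2.modify a [] (· ++ [b])).contains b = true := by
    rw [PySem.Dict.contains_modify]
    simp [hcb2]
  rw [PySem.Dict.keys_modify, PySem.Dict.keys_insert_of_contains _ _ hma,
    PySem.Dict.keys_modify, PySem.Dict.keys_insert_of_contains _ _ hca2]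
  rw [hg2]
  exact ens_keys_nodup _ _ (by rw [hg1]; exact ens_keys_nodup _ _ h)

lemma mem_addIfAbsent (al : List Int) (y x : Int) :
    x ∈ addIfAbsent al y ↔ x ∈ al ∨ x = y := by
  unfold addIfAbsent
  by_cases hc : al.contains y = true
  · rw [if_pos hc]
    have hy : y ∈ al := List.contains_iff_mem.mp hc
    constructor
    · exact Or.inl
    · rintro (h | rfl) <;> assumption
  · rw [if_neg hc]
    simp

lemma nodup_addIfAbsent (al : List Int) (y : Int) (h : al.Nodup) :
    (addIfAbsent al y).Nodup := by
  unfold addIfAbsent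
  by_cases hc : al.contains y = true
  · rwa [if_pos hc]
  · rw [if_neg hc]
    rw [List.nodup_append]
    refine ⟨h, List.nodup_singleton _, ?_⟩
    intro x hx y hy
    rw [List.mem_singleton] at hy
    subst hy
    exact fun heq => absurd (List.contains_iff_mem.mpr (heq ▸ hx)) (by simpa using hc)

lemma stepG_inv {g : PySem.Dict Int (List Int)} {E : List (Int × Int)} {alive : List Int}
    (h : INV g E alive) (a b : Int) :
    INV (stepG g a b) (E ++ [(a, b)]) (addIfAbsent (addIfAbsent alive a) b) := by
  obtain ⟨hnd, hknd, hmem, hgetD, hends⟩ := h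
  refine ⟨nodup_addIfAbsent _ _ (nodup_addIfAbsent _ _ hnd), stepG_keys_nodup g a b hknd,
    ?_, ?_, ?_⟩
  · intro w
    rw [stepG_keys_mem, mem_addIfAbsent, mem_addIfAbsent, hmem]
    tauto
  · intro w hw
    rw [stepG_getD, nbrs_append, nbrs_cons, nbrs_nil, List.append_nil]
    congr 1
    by_cases hwa : w ∈ alive
    · exact hgetD w hwa
    · have h1 : w ∉ g.keys := fun hk => hwa ((hmem w).mp hk)
      have h2 : g.getD w [] = [] := by
        rw [PySem.Dict.getD_eq_get?_getD,
          (PySem.Dict.get?_eq_none_iff_not_mem_keys _ _).mpr h1]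
        rfl
      rw [h2, nbrs_eq_nil]
      intro e he
      have := hends e he
      constructor <;> rintro rfl
      · exact hwa this.1
      · exact hwa this.2
  · intro e he
    rw [List.mem_append] at he
    rcases he with he | he
    · have := hends e he
      constructor <;> rw [mem_addIfAbsent, mem_addIfAbsent] <;> tauto
    · simp only [List.mem_singleton] at he
      subst he
      constructor <;> rw [mem_addIfAbsent, mem_addIfAbsent] <;> simp

lemma build_inv (E : List (Int × Int)) :
    INV (E.foldl (fun g e => stepG g e.1 e.2) PySem.Dict.empty) E
      (E.foldl (fun al e => addIfAbsent (addIfAbsent al e.1) e.2) []) := by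
  induction E using List.reverseRecOn with
  | nil =>
    refine ⟨List.nodup_nil, by simp [PySem.Dict.keys_empty], ?_, ?_, ?_⟩ <;>
      simp [PySem.Dict.keys_empty]
  | append_singleton E e ih =>
    rw [List.foldl_append, List.foldl_append]
    simpa using stepG_inv ih e.1 e.2

lemma foldl_range_zip (A B : List Int) (h : A.length ≤ B.length) :
    ∀ (k : Nat), k ≤ A.length → ∀ g0 : PySem.Dict Int (List Int),
    (List.range k).foldl (fun g (i : Nat) => stepG g ((PySem.List.pyGet? A ((0:Int) + (i : Int))).getD 0)
        ((PySem.List.pyGet? B ((0:Int) + (i : Int))).getD 0)) g0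
      = ((A.zip B).take k).foldl (fun g e => stepG g e.1 e.2) g0 := by
  intro k
  induction k with
  | zero => intro _ g0; rfl
  | succ k ih =>
    intro hk g0
    rw [List.range_succ, List.foldl_append, ih (by omega), List.take_succ, List.foldl_append]
    have hkA : k < A.length := by omega
    have hkz : k < (A.zip B).length := by rw [List.length_zip]; omega
    have hA : (PySem.List.pyGet? A ((0:Int) + ↑k)).getD 0 = A[k] := by
      rw [zero_add, PySem.List.pyGet?_natCast, List.getElem?_eq_getElem hkA]
      rfl
    have hB : (PySem.List.pyGet? B ((0:Int) + ↑k)).getD 0 = B[k] := by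
      rw [zero_add, PySem.List.pyGet?_natCast, List.getElem?_eq_getElem (by omega : k < B.length)]
      rfl
    rw [List.getElem?_eq_getElem hkz, List.getElem_zip]
    simp only [List.foldl_cons, List.foldl_nil, Option.toList_some, hA, hB]

lemma buildGraph_eq (A B : List Int) (h : A.length ≤ B.length) :
    buildGraph A B = (A.zip B).foldl (fun g e => stepG g e.1 e.2) PySem.Dict.empty := by
  unfold buildGraph
  rw [PySem.List.len_eq, PySem.List.pyRange_one, List.foldl_map]
  have h0 : ((A.length : Int) - 0).toNat = A.length := by omega
  rw [h0]
  have hmain := foldl_range_zip A B h A.length le_rfl PySem.Dict.empty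
  rw [List.take_of_length_le (by rw [List.length_zip]; omega)] at hmain
  exact hmain

-- ===== VERDICT (by name: the statement is the Claim_ definition above) =====
theorem solution_spec : Claim_equal_solution := by
  intro N A B hdom hpre
  unfold Spec_solution solution solution_alt
  rw [buildGraph_eq A B hpre]
  simp only [collectAlive_eq]
  exact loop_eq ((A.zip B).foldl (fun al e => addIfAbsent (addIfAbsent al e.1) e.2) []).length
    _ _ _ 0 le_rfl (build_inv (A.zip B))
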